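-- pv_equiv track=rewrite | github.com/rahmangunawans/TradeForce | strategy_generator.py | _williams_fractal
-- ===== SOURCE A (Python) =====
-- def _williams_fractal(hi, lo, p=2):
--     """Detect fractal highs and lows (p bars each side)."""
--     bull_frac = [False]*len(hi)
--     bear_frac = [False]*len(hi)
--     for i in range(p, len(hi)-p):
--         if all(lo[i] < lo[i-j] and lo[i] < lo[i+j] for j in range(1, p+1)):
--             bull_frac[i] = True
--         if all(hi[i] > hi[i-j] and hi[i] > hi[i+j] for j in range(1, p+1)):
--             bear_frac[i] = True
--     return bull_frac, bear_frac
-- ===== SOURCE B (Python) =====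
-- def _rolling(a, p, ext):
--     """Extremum (ext = min or max) of every length-p window of a, by doubling
--     (the top layer of a sparse table); requires p >= 1."""
--     cur, t = a, 1
--     while 2 * t <= p:
--         cur = list(map(ext, cur, cur[t:]))
--         t *= 2
--     return list(map(ext, cur, cur[p - t:]))
--
--
-- def _williams_fractal(hi, lo, p=2):
--     """Detect fractal highs and lows (p bars each side) with precomputed rolling window extrema."""
--     n = len(hi)
--     if p == 0:
--         # no neighbors to compare against: the fractal condition holds vacuously on every bar
--         return [True] * n, [True] * n
--     bull_frac = [False] * n
--     bear_frac = [False] * n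
--     lmin = _rolling(lo, p, min)
--     hmax = _rolling(hi, p, max)
--     for i in range(p, n - p):
--         bull_frac[i] = lo[i] < lmin[i - p] and lo[i] < lmin[i + 1]
--         bear_frac[i] = hi[i] > hmax[i - p] and hi[i] > hmax[i + 1]
--     return bull_frac, bear_frac
-- ===== Notes on version B (the rewrite author's own statement) =====
-- stated objective: alternative
-- what changed: Instead of re-scanning the 2p neighbors of every index with generator 'all(...)' conjunctions, B precomputes the rolling window extrema of lo and hi once by a doubling scheme (top layer of a sparse table) and then compares each bar against its left/right window extremum in one flat pass (p = 0 is the vacuous all-True case in both).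
import Mathlib
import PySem

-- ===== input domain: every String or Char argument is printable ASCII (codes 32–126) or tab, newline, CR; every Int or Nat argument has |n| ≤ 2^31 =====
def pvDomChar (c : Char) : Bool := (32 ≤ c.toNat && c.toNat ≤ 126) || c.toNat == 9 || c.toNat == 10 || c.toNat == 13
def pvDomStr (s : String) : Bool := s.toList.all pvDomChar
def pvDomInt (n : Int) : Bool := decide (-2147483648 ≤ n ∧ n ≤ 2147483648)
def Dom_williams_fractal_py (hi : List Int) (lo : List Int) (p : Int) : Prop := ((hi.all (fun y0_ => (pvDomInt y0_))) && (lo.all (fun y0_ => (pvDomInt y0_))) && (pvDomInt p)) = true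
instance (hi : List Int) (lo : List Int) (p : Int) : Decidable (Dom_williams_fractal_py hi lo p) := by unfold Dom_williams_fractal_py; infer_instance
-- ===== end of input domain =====

-- B replaces A's per-index rescan of the 2p neighbors by rolling window extrema precomputed
-- once with a doubling scheme (top layer of a sparse table): a structurally different
-- algorithm computing the same pair of flag lists (p = 0 is the vacuous all-True case).

-- ===== PORT A =====
-- the two 'all(... for j in range(1, p+1))' generator conditions of A's loop;
-- pyGetD is exact under Pre_ (every index that Python actually evaluates is then in range)
def wfA_bull (lo : List Int) (p i : Int) : Bool :=
  (PySem.List.pyRange 1 (p + 1)).all (fun j =>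
    decide (PySem.List.pyGetD lo i 0 < PySem.List.pyGetD lo (i - j) 0) &&
    decide (PySem.List.pyGetD lo i 0 < PySem.List.pyGetD lo (i + j) 0))

def wfA_bear (hi : List Int) (p i : Int) : Bool :=
  (PySem.List.pyRange 1 (p + 1)).all (fun j =>
    decide (PySem.List.pyGetD hi (i - j) 0 < PySem.List.pyGetD hi i 0) &&
    decide (PySem.List.pyGetD hi (i + j) 0 < PySem.List.pyGetD hi i 0))

def williams_fractal_py (hi : List Int) (lo : List Int) (p : Int) : List Bool × List Bool :=
  (PySem.List.pyRange p ((hi.length : Int) - p)).foldl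
    (fun st i =>
      let st1 := if wfA_bull lo p i then (PySem.List.pySetD st.1 i true, st.2) else st
      if wfA_bear hi p i then (st1.1, PySem.List.pySetD st1.2 i true) else st1)
    (List.replicate hi.length false, List.replicate hi.length false)

-- ===== PORT B =====
-- port of Source B's _rolling(a, p, ext): the 'while 2*t <= p' doubling loop, then one zip for the
-- windows; the while loop is ported with explicit fuel p.toNat + 1 (more than its at most
-- log2(p)+1 iterations, since t starts at 1 and doubles, so the fuel is never exhausted);
-- list(map(ext, xs, ys)) is List.zipWith ext xs ys (both truncate to the shorter argument)
def pvRollLoop (ext : Int → Int → Int) (p : Int) : Nat → List Int → Nat → List Int × Nat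
  | 0, cur, t => (cur, t)
  | fuel + 1, cur, t =>
    if 2 * (t : Int) ≤ p then
      pvRollLoop ext p fuel (List.zipWith ext cur (PySem.List.slice cur (some (t : Int)) none)) (2 * t)
    else (cur, t)

def pvRolling (a : List Int) (p : Int) (ext : Int → Int → Int) : List Int :=
  let r := pvRollLoop ext p (p.toNat + 1) a 1
  List.zipWith ext r.1 (PySem.List.slice r.1 (some (p - (r.2 : Int))) none)

def williams_fractal_py_alt (hi : List Int) (lo : List Int) (p : Int) : List Bool × List Bool :=
  if p = 0 then
    -- Source B's 'p == 0' branch: no neighbors to compare, the condition holds vacuously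
    (List.replicate hi.length true, List.replicate hi.length true)
  else
    let lmin := pvRolling lo p min
    let hmax := pvRolling hi p max
    (PySem.List.pyRange p ((hi.length : Int) - p)).foldl
      (fun st i =>
        (PySem.List.pySetD st.1 i
           (decide (PySem.List.pyGetD lo i 0 < PySem.List.pyGetD lmin (i - p) 0) &&
            decide (PySem.List.pyGetD lo i 0 < PySem.List.pyGetD lmin (i + 1) 0)),
         PySem.List.pySetD st.2 i
           (decide (PySem.List.pyGetD hmax (i - p) 0 < PySem.List.pyGetD hi i 0) &&
            decide (PySem.List.pyGetD hmax (i + 1) 0 < PySem.List.pyGetD hi i 0))))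
      (List.replicate hi.length false, List.replicate hi.length false)

-- ===== PRECONDITION & SPEC =====
-- Pre_ excludes p < 0 (there A's vacuously-true loop always assigns at index len(hi)-p-1 ≥
-- len(hi) and raises IndexError) and, for p ≥ 1 with a nonempty core loop, a lo shorter than
-- hi (there A either raises or its value depends on which out-of-range reads its 'and'/'all'
-- short-circuiting happens to skip, and B's window precomputation raises IndexError).
def Pre_williams_fractal_py (hi : List Int) (lo : List Int) (p : Int) : Prop :=
  (1 ≤ p ∧ (hi.length ≤ lo.length ∨ (hi.length : Int) ≤ 2 * p)) ∨ p = 0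
instance (hi : List Int) (lo : List Int) (p : Int) : Decidable (Pre_williams_fractal_py hi lo p) := by
  unfold Pre_williams_fractal_py; infer_instance

def pvWitness_williams_fractal_py : List Int × List Int × Int := ([1, 5, 1], [3, 1, 4], 1)

def Spec_williams_fractal_py (hi : List Int) (lo : List Int) (p : Int) (out : List Bool × List Bool) : Prop := out = williams_fractal_py_alt hi lo p
instance (hi : List Int) (lo : List Int) (p : Int) (out : List Bool × List Bool) : Decidable (Spec_williams_fractal_py hi lo p out) := by unfold Spec_williams_fractal_py; infer_instance

-- ===== CLAIM (what is proved, stated in full; the proofs are below) =====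
def Claim_equal_williams_fractal_py : Prop := ∀ (hi : List Int) (lo : List Int) (p : Int), Dom_williams_fractal_py hi lo p → Pre_williams_fractal_py hi lo p → Spec_williams_fractal_py hi lo p (williams_fractal_py hi lo p)

-- ===== LEMMAS AND PROOFS =====

-- extremum of the (k+1)-element segment a[s..s+k], the common specification both sides are reduced to
def pvWext (f : Int → Int → Int) (a : List Int) : Nat → Nat → Int
  | s, 0 => a.getD s 0
  | s, (k + 1) => f (a.getD s 0) (pvWext f a (s + 1) k)

lemma pvWext_split (f : Int → Int → Int)
    (hassoc : ∀ x y z, f (f x y) z = f x (f y z)) (a : List Int) (s k m : Nat) :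
    pvWext f a s (k + m + 1) = f (pvWext f a s k) (pvWext f a (s + k + 1) m) := by
  induction k generalizing s with
  | zero => simp only [Nat.zero_add, Nat.add_zero]; rfl
  | succ k ih =>
    have h1 : pvWext f a s (k + 1 + m + 1) = f (a.getD s 0) (pvWext f a (s + 1) (k + 1 + m)) := rfl
    have h2 : pvWext f a s (k + 1) = f (a.getD s 0) (pvWext f a (s + 1) k) := rfl
    rw [h1, show k + 1 + m = k + m + 1 by omega, ih, ← hassoc, ← h2,
        show s + 1 + k + 1 = s + (k + 1) + 1 by omega]

lemma lt_pvWext_min_iff (a : List Int) (c : Int) (s k : Nat) :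
    (c < pvWext min a s k) ↔ ∀ j : Nat, j ≤ k → c < a.getD (s + j) 0 := by
  induction k generalizing s with
  | zero =>
    simp only [pvWext, Nat.le_zero]
    constructor
    · intro h j hj; subst hj; simpa using h
    · intro h; simpa using h 0 rfl
  | succ k ih =>
    rw [show pvWext min a s (k + 1) = min (a.getD s 0) (pvWext min a (s + 1) k) from rfl,
        lt_min_iff, ih]
    constructor
    · rintro ⟨h0, h⟩ j hj
      match j, hj with
      | 0, _ => simpa using h0
      | (j + 1), hj =>
        have := h j (by omega)
        rwa [show s + 1 + j = s + (j + 1) by omega] at this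
    · intro h
      refine ⟨by simpa using h 0 (by omega), fun j hj => ?_⟩
      have := h (j + 1) (by omega)
      rwa [show s + (j + 1) = s + 1 + j by omega] at this

lemma pvWext_max_lt_iff (a : List Int) (c : Int) (s k : Nat) :
    (pvWext max a s k < c) ↔ ∀ j : Nat, j ≤ k → a.getD (s + j) 0 < c := by
  induction k generalizing s with
  | zero =>
    simp only [pvWext, Nat.le_zero]
    constructor
    · intro h j hj; subst hj; simpa using h
    · intro h; simpa using h 0 rfl
  | succ k ih =>
    rw [show pvWext max a s (k + 1) = max (a.getD s 0) (pvWext max a (s + 1) k) from rfl,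
        max_lt_iff, ih]
    constructor
    · rintro ⟨h0, h⟩ j hj
      match j, hj with
      | 0, _ => simpa using h0
      | (j + 1), hj =>
        have := h j (by omega)
        rwa [show s + 1 + j = s + (j + 1) by omega] at this
    · intro h
      refine ⟨by simpa using h 0 (by omega), fun j hj => ?_⟩
      have := h (j + 1) (by omega)
      rwa [show s + (j + 1) = s + 1 + j by omega] at this

-- joining two overlapping (or adjacent) equal-width segments of an idempotent extremum
lemma pvWext_overlap (f : Int → Int → Int)
    (hassoc : ∀ x y z, f (f x y) z = f x (f y z)) (hidem : ∀ x, f x x = x)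
    (a : List Int) (s u k : Nat) (hu : u ≤ k + 1) :
    f (pvWext f a s k) (pvWext f a (s + u) k) = pvWext f a s (u + k) := by
  rcases Nat.eq_zero_or_pos u with rfl | hu1
  · rw [Nat.add_zero, Nat.zero_add]
    exact hidem _
  · by_cases huk : u = k + 1
    · have h1 := pvWext_split f hassoc a s (u - 1) k
      rw [show (u - 1) + k + 1 = u + k by omega, show s + (u - 1) + 1 = s + u by omega] at h1
      rw [h1, show u - 1 = k by omega]
    · have h1 := pvWext_split f hassoc a s (u - 1) k
      rw [show (u - 1) + k + 1 = u + k by omega, show s + (u - 1) + 1 = s + u by omega] at h1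
      have h2 := pvWext_split f hassoc a s (u - 1) (k - u)
      rw [show (u - 1) + (k - u) + 1 = k by omega, show s + (u - 1) + 1 = s + u by omega] at h2
      have h3 := pvWext_split f hassoc a (s + u) (k - u) (u - 1)
      rw [show (k - u) + (u - 1) + 1 = k by omega] at h3
      rw [h1, h2, h3, hassoc]
      congr 1
      rw [← hassoc, hidem]

-- getD of a zipWith, in-bounds
lemma pv_zip_getD (f : Int → Int → Int) (xs ys : List Int) (i : Nat)
    (hx : i < xs.length) (hy : i < ys.length) :
    (List.zipWith f xs ys).getD i 0 = f (xs.getD i 0) (ys.getD i 0) := by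
  rw [List.getD_eq_getElem _ _ (by rw [List.length_zipWith]; omega), List.getElem_zipWith,
      List.getD_eq_getElem _ _ hx, List.getD_eq_getElem _ _ hy]

-- getD of a drop, in-bounds
lemma pv_drop_getD (xs : List Int) (t i : Nat) (h : t + i < xs.length) :
    (xs.drop t).getD i 0 = xs.getD (t + i) 0 := by
  rw [List.getD_eq_getElem _ _ (by rw [List.length_drop]; omega), List.getElem_drop,
      List.getD_eq_getElem _ _ h]

-- invariant of the doubling loop: cur holds the extrema of all width-t windows
lemma pvRollLoop_inv (f : Int → Int → Int)
    (hassoc : ∀ x y z, f (f x y) z = f x (f y z)) (hidem : ∀ x, f x x = x)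
    (a : List Int) (p : Int) :
    ∀ (fuel : Nat) (cur : List Int) (t : Nat),
      1 ≤ t → (t : Int) ≤ p → p.toNat < t + fuel →
      cur.length = a.length + 1 - t →
      (∀ i, i < cur.length → cur.getD i 0 = pvWext f a i (t - 1)) →
      1 ≤ (pvRollLoop f p fuel cur t).2 ∧
      ((pvRollLoop f p fuel cur t).2 : Int) ≤ p ∧
      p < 2 * ((pvRollLoop f p fuel cur t).2 : Int) ∧
      (pvRollLoop f p fuel cur t).1.length = a.length + 1 - (pvRollLoop f p fuel cur t).2 ∧
      (∀ i, i < (pvRollLoop f p fuel cur t).1.length →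
        (pvRollLoop f p fuel cur t).1.getD i 0 = pvWext f a i ((pvRollLoop f p fuel cur t).2 - 1)) := by
  intro fuel
  induction fuel with
  | zero =>
    intro cur t h1 h2 h3 _ _
    exact absurd h2 (by omega)
  | succ fuel ih =>
    intro cur t h1 h2 h3 hlen hval
    by_cases hc : 2 * (t : Int) ≤ p
    · rw [show pvRollLoop f p (fuel + 1) cur t =
            pvRollLoop f p fuel
              (List.zipWith f cur (PySem.List.slice cur (some (t : Int)) none)) (2 * t) by
          simp only [pvRollLoop]; rw [if_pos hc]]
      rw [PySem.List.slice_from_natCast]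
      have hlen' : (List.zipWith f cur (cur.drop t)).length = a.length + 1 - 2 * t := by
        rw [List.length_zipWith, List.length_drop]
        omega
      refine ih _ (2 * t) (by omega) (by omega) (by omega) hlen' ?_
      intro i hi
      rw [hlen'] at hi
      rw [pv_zip_getD f cur (cur.drop t) i (by omega) (by rw [List.length_drop]; omega),
          pv_drop_getD cur t i (by omega),
          hval i (by omega), hval (t + i) (by omega),
          show pvWext f a (t + i) (t - 1) = pvWext f a (i + t) (t - 1) by rw [Nat.add_comm],
          pvWext_overlap f hassoc hidem a i t (t - 1) (by omega),
          show t + (t - 1) = 2 * t - 1 by omega]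
    · rw [show pvRollLoop f p (fuel + 1) cur t = (cur, t) by simp only [pvRollLoop]; rw [if_neg hc]]
      exact ⟨h1, h2, by omega, hlen, hval⟩

-- the window extremum list produced by Source B's _rolling
lemma pvRolling_getD (f : Int → Int → Int)
    (hassoc : ∀ x y z, f (f x y) z = f x (f y z)) (hidem : ∀ x, f x x = x)
    (a : List Int) (q : Nat) (hq : 1 ≤ q) (s : Nat) (hs : s + q ≤ a.length) :
    PySem.List.pyGetD (pvRolling a (q : Int) f) (s : Int) 0 = pvWext f a s (q - 1) := by
  obtain ⟨h1, h2, h3, hlen, hval⟩ :=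
    pvRollLoop_inv f hassoc hidem a (q : Int) ((q : Int).toNat + 1) a 1
      le_rfl (by omega) (by omega) (by omega)
      (fun i _ => rfl)
  simp only [pvRolling]
  have h2' : (pvRollLoop f (q : Int) ((q : Int).toNat + 1) a 1).2 ≤ q := by omega
  rw [PySem.List.pyGetD_natCast,
      show (q : Int) - ((pvRollLoop f (q : Int) ((q : Int).toNat + 1) a 1).2 : Int) =
        ((q - (pvRollLoop f (q : Int) ((q : Int).toNat + 1) a 1).2 : Nat) : Int) by omega,
      PySem.List.slice_from_natCast]
  have h3' : q < 2 * (pvRollLoop f (q : Int) ((q : Int).toNat + 1) a 1).2 := by omega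
  rw [pv_zip_getD f _ _ s (by omega) (by rw [List.length_drop]; omega),
      pv_drop_getD _ _ s (by omega),
      hval s (by omega), hval (q - (pvRollLoop f (q : Int) ((q : Int).toNat + 1) a 1).2 + s)
        (by omega),
      show q - (pvRollLoop f (q : Int) ((q : Int).toNat + 1) a 1).2 + s =
        s + (q - (pvRollLoop f (q : Int) ((q : Int).toNat + 1) a 1).2) by omega,
      pvWext_overlap f hassoc hidem a s _ _ (by omega),
      show q - (pvRollLoop f (q : Int) ((q : Int).toNat + 1) a 1).2 +
        ((pvRollLoop f (q : Int) ((q : Int).toNat + 1) a 1).2 - 1) = q - 1 by omega]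

-- generic characterizations of the two fold shapes of the main loops
lemma pv_foldl_setfold (g : Int → Bool) (a b : Int) (h0 : 0 ≤ a) (l : List Bool)
    (hb : b ≤ (l.length : Int)) :
    ((PySem.List.pyRange a b).foldl (fun st i => PySem.List.pySetD st i (g i)) l).length = l.length ∧
    ∀ k : Nat, k < l.length →
      ((PySem.List.pyRange a b).foldl (fun st i => PySem.List.pySetD st i (g i)) l).getD k false =
        if a ≤ (k : Int) ∧ (k : Int) < b then g k else l.getD k false := by
  obtain ⟨n, hn⟩ : ∃ n, (b - a).toNat = n := ⟨_, rfl⟩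
  induction n generalizing a l with
  | zero =>
    rw [PySem.List.pyRange_one_eq_nil (show b ≤ a by omega)]
    exact ⟨by simp, fun k hk => by simp only [List.foldl_nil]; rw [if_neg (by omega)]⟩
  | succ n ih =>
    rw [PySem.List.pyRange_one_cons (show a < b by omega), List.foldl_cons]
    obtain ⟨H1, H2⟩ := ih (a + 1) (by omega) (PySem.List.pySetD l a (g a))
      (by rw [PySem.List.length_pySetD]; exact hb) (by omega)
    rw [PySem.List.length_pySetD] at H1
    refine ⟨H1, fun k hk => ?_⟩
    rw [H2 k (by rw [PySem.List.length_pySetD]; exact hk)]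
    by_cases hc : a + 1 ≤ (k : Int) ∧ (k : Int) < b
    · rw [if_pos hc, if_pos (by omega)]
    · rw [if_neg hc, PySem.List.pySetD_of_nonneg _ _ h0,
          List.getD_eq_getElem?_getD, List.getElem?_set]
      by_cases hk2 : (k : Int) = a
      · rw [if_pos (by omega), if_pos (by omega), Option.getD_some, if_pos (by omega),
            show a = ((k : Nat) : Int) by omega]
      · rw [if_neg (by omega), ← List.getD_eq_getElem?_getD, if_neg (by omega)]

lemma pv_foldl_condset (c : Int → Bool) (a b : Int) (h0 : 0 ≤ a) (l : List Bool)
    (hb : b ≤ (l.length : Int)) :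
    ((PySem.List.pyRange a b).foldl (fun st i => if c i then PySem.List.pySetD st i true else st) l).length = l.length ∧
    ∀ k : Nat, k < l.length →
      ((PySem.List.pyRange a b).foldl (fun st i => if c i then PySem.List.pySetD st i true else st) l).getD k false =
        if a ≤ (k : Int) ∧ (k : Int) < b then (l.getD k false || c k) else l.getD k false := by
  obtain ⟨n, hn⟩ : ∃ n, (b - a).toNat = n := ⟨_, rfl⟩
  induction n generalizing a l with
  | zero =>
    rw [PySem.List.pyRange_one_eq_nil (show b ≤ a by omega)]
    exact ⟨by simp, fun k hk => by simp only [List.foldl_nil]; rw [if_neg (by omega)]⟩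
  | succ n ih =>
    rw [PySem.List.pyRange_one_cons (show a < b by omega), List.foldl_cons]
    have hlen : (if c a then PySem.List.pySetD l a true else l).length = l.length := by
      by_cases hca : c a = true <;> simp [hca, PySem.List.length_pySetD]
    obtain ⟨H1, H2⟩ := ih (a + 1) (by omega) (if c a then PySem.List.pySetD l a true else l)
      (by rw [hlen]; exact hb) (by omega)
    rw [hlen] at H1
    refine ⟨H1, fun k hk => ?_⟩
    rw [H2 k (by rw [hlen]; exact hk)]
    have hstep : (if c a = true then PySem.List.pySetD l a true else l).getD k false =
        if (k : Int) = a then (l.getD k false || c a) else l.getD k false := by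
      by_cases hk2 : (k : Int) = a
      · rcases Bool.eq_false_or_eq_true (c a) with hca | hca <;>
          simp [hca, hk2, PySem.List.pySetD_of_nonneg _ _ h0, List.getD_eq_getElem?_getD, show a.toNat = k by omega, show k < l.length from hk]
      · rcases Bool.eq_false_or_eq_true (c a) with hca | hca <;>
          simp [hca, hk2, PySem.List.pySetD_of_nonneg _ _ h0, List.getD_eq_getElem?_getD, show ¬ a.toNat = k by omega]
    rw [hstep]
    by_cases hk2 : (k : Int) = a
    · rw [if_pos hk2, if_neg (by omega), if_pos (show a ≤ (k : Int) ∧ (k : Int) < b by omega),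
          show a = (k : Int) from hk2.symm]
    · rw [if_neg hk2]
      by_cases hc : a + 1 ≤ (k : Int) ∧ (k : Int) < b
      · rw [if_pos hc, if_pos (show a ≤ (k : Int) ∧ (k : Int) < b by omega)]
      · rw [if_neg hc, if_neg (by omega)]

-- the pointwise equivalence of the two bull/bear conditions on the core indices
lemma pv_bull_eq (lo : List Int) (q : Nat) (hq : 1 ≤ q) (i : Nat)
    (hil : q ≤ i) (hir : i + q < lo.length) :
    wfA_bull lo (q : Int) (i : Int) =
      (decide (PySem.List.pyGetD lo (i : Int) 0 < PySem.List.pyGetD (pvRolling lo (q : Int) min) ((i : Int) - q) 0) &&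
       decide (PySem.List.pyGetD lo (i : Int) 0 < PySem.List.pyGetD (pvRolling lo (q : Int) min) ((i : Int) + 1) 0)) := by
  rw [show ((i : Nat) : Int) - (q : Int) = ((i - q : Nat) : Int) by omega,
      show ((i : Nat) : Int) + 1 = ((i + 1 : Nat) : Int) by push_cast; ring,
      pvRolling_getD min (fun x y z => min_assoc x y z) (fun x => min_self x) lo q hq (i - q)
        (by omega),
      pvRolling_getD min (fun x y z => min_assoc x y z) (fun x => min_self x) lo q hq (i + 1)
        (by omega),
      Bool.eq_iff_iff]
  simp only [wfA_bull, List.all_eq_true, Bool.and_eq_true, decide_eq_true_eq,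
    PySem.List.mem_pyRange_one, PySem.List.pyGetD_natCast, lt_pvWext_min_iff]
  constructor
  · intro h
    refine ⟨fun j hj => ?_, fun j hj => ?_⟩
    · have hx := (h ((q - j : Nat) : Int) ⟨by omega, by omega⟩).1
      rwa [show (i : Int) - ((q - j : Nat) : Int) = ((i - q + j : Nat) : Int) by omega,
           PySem.List.pyGetD_natCast] at hx
    · have hx := (h ((j + 1 : Nat) : Int) ⟨by omega, by omega⟩).2
      rwa [show (i : Int) + ((j + 1 : Nat) : Int) = ((i + 1 + j : Nat) : Int) by omega,
           PySem.List.pyGetD_natCast] at hx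
  · rintro ⟨hL, hR⟩ x ⟨hx1, hx2⟩
    have hxn : ((x.toNat : Nat) : Int) = x := Int.toNat_of_nonneg (by omega)
    constructor
    · have hx := hL (q - x.toNat) (by omega)
      rw [show i - q + (q - x.toNat) = i - x.toNat by omega] at hx
      rwa [show (i : Int) - x = ((i - x.toNat : Nat) : Int) by omega,
           PySem.List.pyGetD_natCast]
    · have hx := hR (x.toNat - 1) (by omega)
      rw [show i + 1 + (x.toNat - 1) = i + x.toNat by omega] at hx
      rwa [show (i : Int) + x = ((i + x.toNat : Nat) : Int) by omega,
           PySem.List.pyGetD_natCast]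

lemma pv_bear_eq (hi : List Int) (q : Nat) (hq : 1 ≤ q) (i : Nat)
    (hil : q ≤ i) (hir : i + q < hi.length) :
    wfA_bear hi (q : Int) (i : Int) =
      (decide (PySem.List.pyGetD (pvRolling hi (q : Int) max) ((i : Int) - q) 0 < PySem.List.pyGetD hi (i : Int) 0) &&
       decide (PySem.List.pyGetD (pvRolling hi (q : Int) max) ((i : Int) + 1) 0 < PySem.List.pyGetD hi (i : Int) 0)) := by
  rw [show ((i : Nat) : Int) - (q : Int) = ((i - q : Nat) : Int) by omega,
      show ((i : Nat) : Int) + 1 = ((i + 1 : Nat) : Int) by push_cast; ring,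
      pvRolling_getD max (fun x y z => max_assoc x y z) (fun x => max_self x) hi q hq (i - q)
        (by omega),
      pvRolling_getD max (fun x y z => max_assoc x y z) (fun x => max_self x) hi q hq (i + 1)
        (by omega),
      Bool.eq_iff_iff]
  simp only [wfA_bear, List.all_eq_true, Bool.and_eq_true, decide_eq_true_eq,
    PySem.List.mem_pyRange_one, PySem.List.pyGetD_natCast, pvWext_max_lt_iff]
  constructor
  · intro h
    refine ⟨fun j hj => ?_, fun j hj => ?_⟩
    · have hx := (h ((q - j : Nat) : Int) ⟨by omega, by omega⟩).1
      rwa [show (i : Int) - ((q - j : Nat) : Int) = ((i - q + j : Nat) : Int) by omega,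
           PySem.List.pyGetD_natCast] at hx
    · have hx := (h ((j + 1 : Nat) : Int) ⟨by omega, by omega⟩).2
      rwa [show (i : Int) + ((j + 1 : Nat) : Int) = ((i + 1 + j : Nat) : Int) by omega,
           PySem.List.pyGetD_natCast] at hx
  · rintro ⟨hL, hR⟩ x ⟨hx1, hx2⟩
    have hxn : ((x.toNat : Nat) : Int) = x := Int.toNat_of_nonneg (by omega)
    constructor
    · have hx := hL (q - x.toNat) (by omega)
      rw [show i - q + (q - x.toNat) = i - x.toNat by omega] at hx
      rwa [show (i : Int) - x = ((i - x.toNat : Nat) : Int) by omega,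
           PySem.List.pyGetD_natCast]
    · have hx := hR (x.toNat - 1) (by omega)
      rw [show i + 1 + (x.toNat - 1) = i + x.toNat by omega] at hx
      rwa [show (i : Int) + x = ((i + x.toNat : Nat) : Int) by omega,
           PySem.List.pyGetD_natCast]

-- A's fold over a pair of lists splits into two independent folds
lemma pvA_pair (hi lo : List Int) (p : Int) :
    williams_fractal_py hi lo p =
      ((PySem.List.pyRange p ((hi.length : Int) - p)).foldl
         (fun s i => if wfA_bull lo p i then PySem.List.pySetD s i true else s)
         (List.replicate hi.length false),
       (PySem.List.pyRange p ((hi.length : Int) - p)).foldl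
         (fun s i => if wfA_bear hi p i then PySem.List.pySetD s i true else s)
         (List.replicate hi.length false)) := by
  unfold williams_fractal_py
  rw [← PySem.List.foldl_prod_mk]
  congr 1
  funext st i
  by_cases h1 : wfA_bull lo p i <;> by_cases h2 : wfA_bear hi p i <;> simp [h1, h2]

-- B's fold likewise (on its p ≠ 0 branch)
lemma pvB_pair (hi lo : List Int) (p : Int) (hp : p ≠ 0) :
    williams_fractal_py_alt hi lo p =
      ((PySem.List.pyRange p ((hi.length : Int) - p)).foldl
         (fun s i => PySem.List.pySetD s i
           (decide (PySem.List.pyGetD lo i 0 < PySem.List.pyGetD (pvRolling lo p min) (i - p) 0) &&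
            decide (PySem.List.pyGetD lo i 0 < PySem.List.pyGetD (pvRolling lo p min) (i + 1) 0)))
         (List.replicate hi.length false),
       (PySem.List.pyRange p ((hi.length : Int) - p)).foldl
         (fun s i => PySem.List.pySetD s i
           (decide (PySem.List.pyGetD (pvRolling hi p max) (i - p) 0 < PySem.List.pyGetD hi i 0) &&
            decide (PySem.List.pyGetD (pvRolling hi p max) (i + 1) 0 < PySem.List.pyGetD hi i 0)))
         (List.replicate hi.length false)) := by
  unfold williams_fractal_py_alt
  rw [if_neg hp, ← PySem.List.foldl_prod_mk]

-- wfA's generator conditions are vacuously true at p = 0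
lemma pv_bull_zero (lo : List Int) (i : Int) : wfA_bull lo 0 i = true := by
  simp [wfA_bull]

lemma pv_bear_zero (hi : List Int) (i : Int) : wfA_bear hi 0 i = true := by
  simp [wfA_bear]

-- ===== VERDICT (by name: the statement is the Claim_ definition above) =====
theorem williams_fractal_py_spec : Claim_equal_williams_fractal_py := by
  intro hi lo p _hdom hpre
  unfold Spec_williams_fractal_py
  rcases hpre with ⟨hp, hlen⟩ | rfl
  case inr =>
    -- p = 0: A's conditions are vacuous, every index of the core range is set True
    rw [pvA_pair]
    unfold williams_fractal_py_alt
    rw [if_pos rfl]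
    obtain ⟨h1len, h1⟩ := pv_foldl_condset (wfA_bull lo 0) 0 ((hi.length : Int) - 0) le_rfl
      (List.replicate hi.length false) (by simp)
    obtain ⟨h2len, h2⟩ := pv_foldl_condset (wfA_bear hi 0) 0 ((hi.length : Int) - 0) le_rfl
      (List.replicate hi.length false) (by simp)
    rw [List.length_replicate] at h1len h2len
    rw [Prod.mk.injEq]
    constructor
    · apply List.ext_getElem (by rw [h1len, List.length_replicate])
      intro k hk1 hk2
      rw [h1len] at hk1
      rw [← List.getD_eq_getElem _ false, ← List.getD_eq_getElem _ true,
          h1 k (by simpa using hk1), if_pos (⟨by omega, by omega⟩ : (0:Int) ≤ (k:Int) ∧ (k:Int) < (hi.length:Int) - 0)]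
      simp [pv_bull_zero]
    · apply List.ext_getElem (by rw [h2len, List.length_replicate])
      intro k hk1 hk2
      rw [h2len] at hk1
      rw [← List.getD_eq_getElem _ false, ← List.getD_eq_getElem _ true,
          h2 k (by simpa using hk1), if_pos (⟨by omega, by omega⟩ : (0:Int) ≤ (k:Int) ∧ (k:Int) < (hi.length:Int) - 0)]
      simp [pv_bear_zero]
  rw [pvA_pair, pvB_pair hi lo p (by omega)]
  by_cases hcore : (hi.length : Int) - p ≤ p
  · rw [PySem.List.pyRange_one_eq_nil hcore]
    rfl
  · have hlo : hi.length ≤ lo.length := by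
      rcases hlen with h | h
      · exact h
      · omega
    obtain ⟨q, rfl⟩ : ∃ q : Nat, ((q : Nat) : Int) = p :=
      ⟨p.toNat, Int.toNat_of_nonneg (by omega)⟩
    have hq : 1 ≤ q := by omega
    have ha0 : (0 : Int) ≤ (q : Int) := by omega
    have hbn : ((hi.length : Int) - (q : Int)) ≤ ((List.replicate hi.length false).length : Int) := by
      simp
    obtain ⟨hA1len, hA1⟩ := pv_foldl_condset (wfA_bull lo (q : Int)) (q : Int)
      ((hi.length : Int) - (q : Int)) ha0 (List.replicate hi.length false) hbn
    obtain ⟨hA2len, hA2⟩ := pv_foldl_condset (wfA_bear hi (q : Int)) (q : Int)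
      ((hi.length : Int) - (q : Int)) ha0 (List.replicate hi.length false) hbn
    obtain ⟨hB1len, hB1⟩ := pv_foldl_setfold
      (fun i => decide (PySem.List.pyGetD lo i 0 < PySem.List.pyGetD (pvRolling lo (q : Int) min) (i - (q : Int)) 0) &&
                decide (PySem.List.pyGetD lo i 0 < PySem.List.pyGetD (pvRolling lo (q : Int) min) (i + 1) 0))
      (q : Int) ((hi.length : Int) - (q : Int)) ha0 (List.replicate hi.length false) hbn
    obtain ⟨hB2len, hB2⟩ := pv_foldl_setfold
      (fun i => decide (PySem.List.pyGetD (pvRolling hi (q : Int) max) (i - (q : Int)) 0 < PySem.List.pyGetD hi i 0) &&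
                decide (PySem.List.pyGetD (pvRolling hi (q : Int) max) (i + 1) 0 < PySem.List.pyGetD hi i 0))
      (q : Int) ((hi.length : Int) - (q : Int)) ha0 (List.replicate hi.length false) hbn
    rw [Prod.mk.injEq]
    constructor
    · apply List.ext_getElem (by rw [hA1len, hB1len])
      intro k hk1 hk2
      rw [hA1len, List.length_replicate] at hk1
      rw [← List.getD_eq_getElem _ false, ← List.getD_eq_getElem _ false,
          hA1 k (by simpa using hk1), hB1 k (by simpa using hk1)]
      by_cases hin : (q : Int) ≤ (k : Int) ∧ (k : Int) < (hi.length : Int) - (q : Int)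
      · rw [if_pos hin, if_pos hin, List.getD_replicate _ (by omega), Bool.false_or]
        exact pv_bull_eq lo q hq k (by omega) (by omega)
      · rw [if_neg hin, if_neg hin]
    · apply List.ext_getElem (by rw [hA2len, hB2len])
      intro k hk1 hk2
      rw [hA2len, List.length_replicate] at hk1
      rw [← List.getD_eq_getElem _ false, ← List.getD_eq_getElem _ false,
          hA2 k (by simpa using hk1), hB2 k (by simpa using hk1)]
      by_cases hin : (q : Int) ≤ (k : Int) ∧ (k : Int) < (hi.length : Int) - (q : Int)
      · rw [if_pos hin, if_pos hin, List.getD_replicate _ (by omega), Bool.false_or]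
        exact pv_bear_eq hi q hq k (by omega) (by omega)
      · rw [if_neg hin, if_neg hin]
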